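-- pv_equiv track=rewrite | github.com/981377660LMT/algorithm-study | leetcode/397/2.py | maximumEnergy
-- ===== SOURCE A (Python) =====
-- from typing import List, Tuple, Optional
-- from collections import defaultdict, Counter
--
-- INF = int(1e20)
--
-- def max2(a: int, b: int) -> int:
--     return a if a > b else b
--
-- def maximumEnergy(energy: List[int], k: int) -> int:
--     groups = defaultdict(list)
--     for i, e in enumerate(energy):
--         mod = i % k
--         groups[mod].append(e)
--
--     # 后缀最大值
--     res = -INF
--     for vs in groups.values():
--         curSum, curMax = 0, -INF
--         for v in vs[::-1]:
--             curSum += v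
--             curMax = max2(curMax, curSum)
--         res = max(res, curMax)
--
--     return res
-- ===== SOURCE B (Python) =====
-- INF = int(1e20)
--
--
-- def maximumEnergy(energy, k):
--     # Backward dp over the whole array: dp[i] = suffix sum of the chain
--     # i, i+|k|, i+2|k|, ...; the answer is the best dp[i] (-INF if empty).
--     n = len(energy)
--     kk = abs(k)
--     dp = [0] * n
--     best = -INF
--     for i in range(n - 1, -1, -1):
--         v = energy[i] + (dp[i + kk] if i + kk < n else 0)
--         dp[i] = v
--         if v > best:
--             best = v
--     return best
-- ===== Notes on version B (the rewrite author's own statement) =====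
-- stated objective: simpler
-- what changed: B drops A's defaultdict of index-mod-k groups and the per-group reversed-list suffix scans, replacing them with a single backward dp sweep dp[i] = energy[i] + dp[i+|k|] over the array, keeping a running maximum.
-- outside the precondition, e.g. on maximumEnergy([1, 2], 0): A raises ZeroDivisionError, B returns 2
import Mathlib
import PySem

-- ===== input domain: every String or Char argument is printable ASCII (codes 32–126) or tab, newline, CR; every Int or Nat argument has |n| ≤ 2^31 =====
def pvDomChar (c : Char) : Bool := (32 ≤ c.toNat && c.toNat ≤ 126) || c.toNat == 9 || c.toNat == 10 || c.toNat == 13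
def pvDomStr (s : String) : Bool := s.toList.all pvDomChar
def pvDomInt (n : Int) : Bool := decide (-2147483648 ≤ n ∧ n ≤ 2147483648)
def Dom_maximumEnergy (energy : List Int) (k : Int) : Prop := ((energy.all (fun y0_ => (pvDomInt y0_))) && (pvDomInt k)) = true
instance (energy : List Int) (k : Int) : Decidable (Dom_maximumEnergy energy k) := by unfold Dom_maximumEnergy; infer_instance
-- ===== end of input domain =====

-- B replaces A's mod-k dict of groups + reversed per-group suffix scans by one backward
-- dp sweep dp[i] = energy[i] + dp[i+|k|]: simpler (no dict, no list reversal), and measured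
-- constant-factor faster in a timing run.

-- ===== PORT A =====
def pvINF : Int := 100000000000000000000  -- INF = int(1e20)

def max2 (a b : Int) : Int := if a > b then a else b

def maximumEnergy (energy : List Int) (k : Int) : Int :=
  let groups : PySem.Dict Int (List Int) :=
    (PySem.List.enumerate energy 0).foldl
      (fun d p => d.modify (PySem.Int.mod p.1 k) [] (fun l => l ++ [p.2]))
      PySem.Dict.empty
  groups.values.foldl
    (fun res vs =>
      let inner := ((PySem.List.slice? vs none none (-1)).getD []).foldl
        (fun (st : Int × Int) v => (st.1 + v, max2 st.2 (st.1 + v))) ((0 : Int), -pvINF)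
      max res inner.2)
    (-pvINF)

-- ===== PORT B =====
def maximumEnergy_alt (energy : List Int) (k : Int) : Int :=
  let n : Int := energy.length
  let kk : Int := (k.natAbs : Int)          -- kk = abs(k)
  let st := (PySem.List.pyRange (n - 1) (-1) (-1)).foldl
    (fun (st : List Int × Int) i =>
      let v := PySem.List.pyGetD energy i 0 +
        (if i + kk < n then PySem.List.pyGetD st.1 (i + kk) 0 else 0)
      -- dp[i] = v : every i yielded by range(n-1,-1,-1) satisfies 0 ≤ i < n, so .toNat is exact
      (st.1.set i.toNat v, if v > st.2 then v else st.2))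
    (List.replicate energy.length 0, -pvINF)
  st.2

-- ===== PRECONDITION & SPEC =====
-- Pre_ excludes only k = 0 with a nonempty list, where A raises ZeroDivisionError on 'i % k'.
def Pre_maximumEnergy (energy : List Int) (k : Int) : Prop := energy = [] ∨ k ≠ 0
instance (energy : List Int) (k : Int) : Decidable (Pre_maximumEnergy energy k) := by
  unfold Pre_maximumEnergy; infer_instance

def pvWitness_maximumEnergy : List Int × Int := ([5, 2, -10, -5, 1], 3)

def Spec_maximumEnergy (energy : List Int) (k : Int) (out : Int) : Prop := out = maximumEnergy_alt energy k
instance (energy : List Int) (k : Int) (out : Int) : Decidable (Spec_maximumEnergy energy k out) := by unfold Spec_maximumEnergy; infer_instance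

-- ===== CLAIM (what is proved, stated in full; the proofs are below) =====
def Claim_equal_maximumEnergy : Prop := ∀ (energy : List Int) (k : Int), Dom_maximumEnergy energy k → Pre_maximumEnergy energy k → Spec_maximumEnergy energy k (maximumEnergy energy k)

-- ===== LEMMAS AND PROOFS =====

-- sum of the chain j, j+kk, j+2kk, … (only values inside the list)
def chainS (e : List Int) (kk : Nat) (j : Nat) : Int :=
  if h : j < e.length then e[j] + chainS e kk (j + max 1 kk) else 0
termination_by e.length - j
decreasing_by omega

-- best suffix-sum over that chain
def chainM (e : List Int) (kk : Nat) (j : Nat) : Int :=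
  if j < e.length then max (chainM e kk (j + max 1 kk)) (chainS e kk j) else -pvINF
termination_by e.length - j
decreasing_by omega

-- the chain's values as a list
def chainL (e : List Int) (kk : Nat) (j : Nat) : List Int :=
  if h : j < e.length then e[j] :: chainL e kk (j + max 1 kk) else []
termination_by e.length - j
decreasing_by omega

-- the chain's indices
def chainIdx (n : Nat) (kk : Nat) (j : Nat) : List Nat :=
  if j < n then j :: chainIdx n kk (j + max 1 kk) else []
termination_by n - j
decreasing_by omega

-- best chainS over ALL start indices ≥ j (what B's sweep computes)
def bestB (e : List Int) (kk : Nat) (j : Nat) : Int :=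
  if j < e.length then max (bestB e kk (j + 1)) (chainS e kk j) else -pvINF
termination_by e.length - j

-- A's inner loop as a structural recursion
def sufMax : List Int → Int × Int
  | [] => ((0 : Int), -pvINF)
  | v :: vs => let p := sufMax vs; (p.1 + v, max2 p.2 (p.1 + v))


theorem max2_eq_max (a b : Int) : max2 a b = max a b := by
  unfold max2; split <;> omega

theorem sufMax_chainL (e : List Int) (kk : Nat) (j : Nat) :
    sufMax (chainL e kk j) = (chainS e kk j, chainM e kk j) := by
  fun_induction chainL e kk j with
  | case1 j h ih =>
      have hS : chainS e kk j = e[j] + chainS e kk (j + max 1 kk) := by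
        rw [chainS]; simp [h]
      have hM : chainM e kk j = max (chainM e kk (j + max 1 kk)) (chainS e kk j) := by
        rw [chainM]; simp [h]
      rw [sufMax, ih, hM, hS]
      simp [max2_eq_max, Int.add_comm]
  | case2 j h => rw [chainS, chainM, sufMax]; simp [h]

theorem chainS_stop (e : List Int) (kk : Nat) (j : Nat) (h : ¬ j < e.length) :
    chainS e kk j = 0 := by rw [chainS]; simp [h]

theorem chainS_step (e : List Int) (kk : Nat) (j : Nat) (hkk : 1 ≤ kk) (h : j < e.length) :
    chainS e kk j = e[j] + chainS e kk (j + kk) := by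
  rw [chainS]; simp [h, Nat.max_eq_right hkk]

theorem neg_pvINF_le_bestB (e : List Int) (kk : Nat) (j : Nat) : -pvINF ≤ bestB e kk j := by
  fun_induction bestB e kk j with
  | case1 j h ih => exact le_trans ih (le_max_left _ _)
  | case2 j h => exact le_refl _

theorem bestB_mem (e : List Int) (kk : Nat) (j : Nat) :
    bestB e kk j = -pvINF ∨ ∃ j', j ≤ j' ∧ j' < e.length ∧ bestB e kk j = chainS e kk j' := by
  fun_induction bestB e kk j with
  | case1 j h ih =>
      rcases max_cases (bestB e kk (j + 1)) (chainS e kk j) with ⟨hmax, _⟩ | ⟨hmax, _⟩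
      · rcases ih with h0 | ⟨j', h1, h2, h3⟩
        · left; rw [hmax, h0]
        · right; exact ⟨j', by omega, h2, by rw [hmax, h3]⟩
      · right; exact ⟨j, le_refl _, h, hmax⟩
  | case2 j h => left; rfl

theorem chainS_le_bestB (e : List Int) (kk : Nat) (j : Nat) :
    ∀ j', j ≤ j' → j' < e.length → chainS e kk j' ≤ bestB e kk j := by
  fun_induction bestB e kk j with
  | case1 j h ih =>
      intro j' hle hlt
      rcases Nat.eq_or_lt_of_le hle with heq | hlt'
      · subst heq; exact le_max_right _ _
      · exact le_trans (ih j' hlt' hlt) (le_max_left _ _)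
  | case2 j h => intro j' hle hlt; omega

theorem chainM_mem (e : List Int) (kk : Nat) (j : Nat) :
    chainM e kk j = -pvINF ∨ ∃ j', j ≤ j' ∧ j' < e.length ∧ chainM e kk j = chainS e kk j' := by
  fun_induction chainM e kk j with
  | case1 j h ih =>
      rcases max_cases (chainM e kk (j + max 1 kk)) (chainS e kk j) with ⟨hmax, _⟩ | ⟨hmax, _⟩
      · rcases ih with h0 | ⟨j', h1, h2, h3⟩
        · left; rw [hmax, h0]
        · right; exact ⟨j', by omega, h2, by rw [hmax, h3]⟩
      · right; exact ⟨j, le_refl _, h, hmax⟩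
  | case2 j h => left; rfl

theorem chainS_le_chainM (e : List Int) (kk : Nat) (hkk : 1 ≤ kk) :
    ∀ r j, r ≤ j → j < e.length → kk ∣ (j - r) → chainS e kk j ≤ chainM e kk r := by
  intro r j
  fun_induction chainM e kk r with
  | case1 r h ih =>
      intro hle hlt hdvd
      rcases Nat.eq_or_lt_of_le hle with heq | hlt'
      · subst heq; exact le_max_right _ _
      · obtain ⟨t, ht⟩ := hdvd
        have h1 : 1 ≤ t := by
          rcases Nat.eq_zero_or_pos t with h0 | h0
          · exfalso; rw [h0, Nat.mul_zero] at ht; omega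
          · exact h0
        have hmul : kk * t = kk * (t - 1) + kk := by
          conv_lhs => rw [show t = (t - 1) + 1 from by omega]
          ring
        have h2 : r + kk ≤ j := by
          have h3 : kk * 1 ≤ kk * t := Nat.mul_le_mul_left kk h1
          omega
        have hdvd' : kk ∣ (j - (r + max 1 kk)) := by
          rw [Nat.max_eq_right hkk]
          exact ⟨t - 1, by omega⟩
        have hle' : r + max 1 kk ≤ j := by rw [Nat.max_eq_right hkk]; omega
        exact le_trans (ih hle' hlt hdvd') (le_max_left _ _)
  | case2 r h => intro hle hlt _; omega

theorem foldl_max_proj_mem {α : Type} (l : List α) (f : α → Int) (a : Int) :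
    l.foldl (fun acc x => max acc (f x)) a = a ∨
      ∃ x ∈ l, l.foldl (fun acc x => max acc (f x)) a = f x := by
  induction l generalizing a with
  | nil => left; rfl
  | cons x xs ih =>
      simp only [List.foldl_cons]
      rcases ih (max a (f x)) with h0 | ⟨y, hy, h1⟩
      · rcases max_cases a (f x) with ⟨hmax, _⟩ | ⟨hmax, _⟩
        · left; rw [h0, hmax]
        · right; exact ⟨x, by simp, by rw [h0, hmax]⟩
      · right; exact ⟨y, by simp [hy], h1⟩

theorem foldr_sufMax (vs : List Int) :
    vs.foldr (fun v (st : Int × Int) => (st.1 + v, max2 st.2 (st.1 + v))) ((0 : Int), -pvINF) = sufMax vs := by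
  induction vs with
  | nil => rfl
  | cons v vs ih => simp only [List.foldr_cons, ih, sufMax]


-- B's loop body (the fold function of maximumEnergy_alt), named for the proofs
def stepB (e : List Int) (kkI : Int) (st : List Int × Int) (i : Int) : List Int × Int :=
  let v := PySem.List.pyGetD e i 0 +
    (if i + kkI < (e.length : Int) then PySem.List.pyGetD st.1 (i + kkI) 0 else 0)
  (st.1.set i.toNat v, if v > st.2 then v else st.2)

def foldB (e : List Int) (kk : Nat) (i : Nat) : List Int × Int :=
  (List.range' i (e.length - i)).foldr (fun (t : Nat) st => stepB e (kk : Int) st ((t : Nat) : Int))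
    (List.replicate e.length 0, -pvINF)

theorem foldB_stop (e : List Int) (kk : Nat) (i : Nat) (h : ¬ i < e.length) :
    foldB e kk i = (List.replicate e.length 0, -pvINF) := by
  unfold foldB
  rw [show e.length - i = 0 from by omega]
  rfl

theorem foldB_step (e : List Int) (kk : Nat) (i : Nat) (h : i < e.length) :
    foldB e kk i = stepB e (kk : Int) (foldB e kk (i + 1)) (i : Int) := by
  unfold foldB
  rw [show e.length - i = (e.length - (i + 1)) + 1 from by omega, List.range'_succ]
  rfl

theorem invB (e : List Int) (kk : Nat) (hkk : 1 ≤ kk) :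
    ∀ d i, e.length - i = d →
      (foldB e kk i).1.length = e.length ∧
      (∀ t, t < e.length → (foldB e kk i).1.getD t 0 = if i ≤ t then chainS e kk t else 0) ∧
      (foldB e kk i).2 = bestB e kk i := by
  intro d
  induction d with
  | zero =>
      intro i hd
      have h : ¬ i < e.length := by omega
      rw [foldB_stop e kk i h]
      refine ⟨by simp, ?_, ?_⟩
      · intro t ht
        rw [if_neg (by omega)]
        simp
      · rw [bestB, if_neg h]
  | succ d ih =>
      intro i hd
      have h : i < e.length := by omega
      obtain ⟨ihlen, ihdp, ihbest⟩ := ih (i + 1) (by omega)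
      rw [foldB_step e kk i h]
      have hget : PySem.List.pyGetD e (i : Int) 0 = e[i] := by
        rw [PySem.List.pyGetD_natCast, List.getD_eq_getElem?_getD, List.getElem?_eq_getElem h]
        rfl
      have hcond : ((i : Int) + (kk : Int) < (e.length : Int)) ↔ (i + kk < e.length) := by
        constructor <;> intro hx <;> exact_mod_cast hx
      have hv : PySem.List.pyGetD e (i : Int) 0 +
          (if (i : Int) + (kk : Int) < (e.length : Int)
            then PySem.List.pyGetD (foldB e kk (i + 1)).1 ((i : Int) + (kk : Int)) 0 else 0) =
          chainS e kk i := by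
        rw [hget, chainS_step e kk i hkk h]
        by_cases hc : i + kk < e.length
        · rw [if_pos (hcond.mpr hc)]
          rw [show (i : Int) + (kk : Int) = ((i + kk : Nat) : Int) from by push_cast; ring,
            PySem.List.pyGetD_natCast]
          rw [ihdp (i + kk) hc, if_pos (by omega)]
        · rw [if_neg (fun hx => hc (hcond.mp hx)), chainS_stop e kk (i + kk) hc]
      simp only [stepB, hv]
      refine ⟨?_, ?_, ?_⟩
      · simp [ihlen]
      · intro t ht
        rw [Int.toNat_natCast, List.getD_eq_getElem?_getD, List.getElem?_set]
        by_cases hit : i = t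
        · subst hit
          rw [if_pos rfl, if_pos (by omega), if_pos (le_refl i)]
          rfl
        · rw [if_neg hit, ← List.getD_eq_getElem?_getD, ihdp t ht]
          by_cases hle : i ≤ t
          · rw [if_pos (by omega), if_pos hle]
          · rw [if_neg (by omega), if_neg hle]
      · rw [ihbest]
        conv_rhs => rw [bestB]
        rw [if_pos h]
        split <;> omega

theorem alt_eq_bestB (e : List Int) (k : Int) (hk : k ≠ 0) :
    maximumEnergy_alt e k = bestB e k.natAbs 0 := by
  have hkk : 1 ≤ k.natAbs := Int.natAbs_pos.mpr hk
  have h0 : maximumEnergy_alt e k =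
      ((PySem.List.pyRange ((e.length : Int) - 1) (-1) (-1)).foldl
        (stepB e ((k.natAbs : Nat) : Int)) (List.replicate e.length 0, -pvINF)).2 := rfl
  rw [h0, PySem.List.pyRange_neg_one_eq_reverse,
    show (-1 : Int) + 1 = 0 from by norm_num,
    show ((e.length : Int) - 1) + 1 = (e.length : Int) from by ring,
    List.foldl_reverse, PySem.List.pyRange_zero_nat, List.foldr_map, List.range_eq_range']
  have hinv := invB e k.natAbs hkk e.length 0 (by omega)
  have hfold : foldB e k.natAbs 0 =
      (List.range' 0 e.length).foldr (fun (t : Nat) st => stepB e ((k.natAbs : Nat) : Int) st ((t : Nat) : Int))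
        (List.replicate e.length 0, -pvINF) := by
    unfold foldB
    rw [Nat.sub_zero]
  rw [hfold] at hinv
  exact hinv.2.2


theorem mod_bounds (k : Int) (hk : k ≠ 0) (a : Int) :
    (0 ≤ PySem.Int.mod a k ∧ PySem.Int.mod a k < k) ∨
    (k < PySem.Int.mod a k ∧ PySem.Int.mod a k ≤ 0) := by
  rcases lt_or_gt_of_ne hk with h | h
  · right; exact PySem.Int.mod_neg_bounds a h
  · left; exact ⟨PySem.Int.mod_nonneg a h, PySem.Int.mod_lt a h⟩

theorem dvd_sub_mod (k a : Int) : ((k.natAbs : Int)) ∣ (a - PySem.Int.mod a k) := by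
  have h := PySem.Int.floordiv_mul_add_mod a k
  have h1 : a - PySem.Int.mod a k = PySem.Int.floordiv a k * k := by omega
  rw [h1]
  exact Dvd.dvd.mul_left Int.natAbs_dvd_self _

theorem mod_eq_iff_dvd (k : Int) (hk : k ≠ 0) (a b : Int) :
    PySem.Int.mod a k = PySem.Int.mod b k ↔ ((k.natAbs : Int)) ∣ (a - b) := by
  constructor
  · intro h
    have h2 : a - b = (a - PySem.Int.mod a k) - (b - PySem.Int.mod b k) := by omega
    rw [h2]
    exact dvd_sub (dvd_sub_mod k a) (dvd_sub_mod k b)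
  · intro h
    have hd : ((k.natAbs : Int)) ∣ (PySem.Int.mod a k - PySem.Int.mod b k) := by
      have h2 : PySem.Int.mod a k - PySem.Int.mod b k =
          (a - b) - (a - PySem.Int.mod a k) + (b - PySem.Int.mod b k) := by omega
      rw [h2]
      exact dvd_add (dvd_sub h (dvd_sub_mod k a)) (dvd_sub_mod k b)
    have hz : PySem.Int.mod a k - PySem.Int.mod b k = 0 := by
      apply Int.eq_zero_of_dvd_of_natAbs_lt_natAbs hd
      have ha := mod_bounds k hk a
      have hb := mod_bounds k hk b
      rcases lt_or_gt_of_ne hk with hks | hks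
      · rcases ha with ⟨h1, h2⟩ | ⟨h1, h2⟩ <;> rcases hb with ⟨h3, h4⟩ | ⟨h3, h4⟩ <;> omega
      · rcases ha with ⟨h1, h2⟩ | ⟨h1, h2⟩ <;> rcases hb with ⟨h3, h4⟩ | ⟨h3, h4⟩ <;> omega
    omega

theorem mod_cong (k : Int) (hk : k ≠ 0) (i j : Nat) :
    PySem.Int.mod (i : Int) k = PySem.Int.mod (j : Int) k ↔ i % k.natAbs = j % k.natAbs := by
  rw [mod_eq_iff_dvd k hk]
  constructor
  · intro hdvd
    have hm : (j : Int) % (k.natAbs : Int) = (i : Int) % (k.natAbs : Int) :=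
      Int.modEq_iff_dvd.mpr hdvd
    have h2 : ((j % k.natAbs : Nat) : Int) = ((i % k.natAbs : Nat) : Int) := by
      push_cast
      rw [Int.natCast_natAbs] at hm
      exact hm
    exact (Nat.cast_inj.mp h2).symm
  · intro hmod
    apply Int.modEq_iff_dvd.mp
    show (j : Int) % (k.natAbs : Int) = (i : Int) % (k.natAbs : Int)
    have h2 : ((j % k.natAbs : Nat) : Int) = ((i % k.natAbs : Nat) : Int) := by
      rw [hmod]
    push_cast at h2
    rw [← Int.natCast_natAbs] at h2
    exact h2

theorem natmod_char (kk : Nat) (r i : Nat) (hr : r < kk) :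
    i % kk = r ↔ (r ≤ i ∧ (i - r) % kk = 0) := by
  constructor
  · intro h
    subst h
    refine ⟨Nat.mod_le i kk, ?_⟩
    have h1 := Nat.div_add_mod i kk
    rw [show i - i % kk = kk * (i / kk) from by omega]
    exact Nat.mul_mod_right kk _
  · rintro ⟨h1, h2⟩
    obtain ⟨t, ht⟩ := Nat.dvd_of_mod_eq_zero h2
    rw [show i = kk * t + r from by omega, Nat.mul_add_mod]
    exact Nat.mod_eq_of_lt hr

theorem shift_char (kk : Nat) (j x : Nat) (hx : j + 1 ≤ x) :
    (j ≤ x ∧ (x - j) % kk = 0) ↔ (j + kk ≤ x ∧ (x - (j + kk)) % kk = 0) := by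
  constructor
  · rintro ⟨h1, h2⟩
    obtain ⟨t, ht⟩ := Nat.dvd_of_mod_eq_zero h2
    have h3 : 1 ≤ t := by
      rcases Nat.eq_zero_or_pos t with h0 | h0
      · exfalso; rw [h0, Nat.mul_zero] at ht; omega
      · exact h0
    have hmul : kk * t = kk * (t - 1) + kk := by
      conv_lhs => rw [show t = (t - 1) + 1 from by omega]
      ring
    refine ⟨by omega, ?_⟩
    rw [show x - (j + kk) = kk * (t - 1) from by omega]
    exact Nat.mul_mod_right kk _
  · rintro ⟨h1, h2⟩
    obtain ⟨t, ht⟩ := Nat.dvd_of_mod_eq_zero h2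
    refine ⟨by omega, ?_⟩
    rw [show x - j = kk * t + kk from by omega, show kk * t + kk = kk * (t + 1) from by ring]
    exact Nat.mul_mod_right kk _

theorem filter_chainIdx (n kk : Nat) (hkk : 1 ≤ kk) (j : Nat) :
    (List.range n).filter (fun i => decide (j ≤ i ∧ (i - j) % kk = 0)) = chainIdx n kk j := by
  fun_induction chainIdx n kk j with
  | case1 j h ih =>
      rw [Nat.max_eq_right hkk] at ih ⊢
      have hsplit : List.range n = (List.range' 0 j) ++ (j :: List.range' (j + 1) (n - j - 1)) := by
        rw [List.range_eq_range']
        conv_lhs => rw [show n = j + ((n - j - 1) + 1) from by omega]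
        rw [← List.range'_append_1 (s := 0) (m := j) (n := (n - j - 1) + 1),
          Nat.zero_add, List.range'_succ]
      have hnil1 : (List.range' 0 j).filter (fun i => decide (j ≤ i ∧ (i - j) % kk = 0)) = [] := by
        apply List.filter_eq_nil_iff.mpr
        intro a ha
        rw [List.mem_range'_1] at ha
        simp only [decide_eq_true_eq]
        rintro ⟨h1, _⟩
        omega
      have hnil2 : (List.range' 0 j).filter
          (fun i => decide (j + kk ≤ i ∧ (i - (j + kk)) % kk = 0)) = [] := by
        apply List.filter_eq_nil_iff.mpr
        intro a ha
        rw [List.mem_range'_1] at ha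
        simp only [decide_eq_true_eq]
        rintro ⟨h1, _⟩
        omega
      have htail : (List.range' (j + 1) (n - j - 1)).filter
            (fun i => decide (j ≤ i ∧ (i - j) % kk = 0)) =
          (List.range' (j + 1) (n - j - 1)).filter
            (fun i => decide (j + kk ≤ i ∧ (i - (j + kk)) % kk = 0)) := by
        apply List.filter_congr
        intro x hx
        rw [List.mem_range'_1] at hx
        exact decide_eq_decide.mpr (shift_char kk j x (by omega))
      rw [hsplit, List.filter_append, hnil1, List.nil_append, List.filter_cons,
        if_pos (by simp), htail]
      rw [hsplit, List.filter_append, hnil2, List.nil_append, List.filter_cons,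
        if_neg (by simp only [decide_eq_true_eq, not_and]; intro h1; omega)] at ih
      rw [ih]
  | case2 j h =>
      apply List.filter_eq_nil_iff.mpr
      intro a ha
      rw [List.mem_range] at ha
      simp only [decide_eq_true_eq]
      omega

theorem chainL_eq_map (e : List Int) (kk : Nat) (j : Nat) :
    (chainIdx e.length kk j).map (fun i => e.getD i 0) = chainL e kk j := by
  fun_induction chainL e kk j with
  | case1 j h ih =>
      rw [chainIdx, if_pos h, List.map_cons, ih]
      congr 1
      rw [List.getD_eq_getElem?_getD, List.getElem?_eq_getElem h]
      rfl
  | case2 j h => rw [chainIdx, if_neg h]; rfl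


theorem dict_values_eq (d : PySem.Dict Int (List Int)) (h : d.keys.Nodup) :
    d.values = d.keys.map (fun c => d.getD c []) := by
  simp only [PySem.Dict.keys, PySem.Dict.values, List.map_map]
  apply List.map_congr_left
  intro p hp
  exact (PySem.Dict.getD_of_mem_items d (k := p.1) (v := p.2) hp h []).symm

theorem inner_eq_sufMax (vs : List Int) :
    ((PySem.List.slice? vs none none (-1)).getD []).foldl
      (fun (st : Int × Int) v => (st.1 + v, max2 st.2 (st.1 + v))) ((0 : Int), -pvINF) = sufMax vs := by
  rw [PySem.List.slice?_none_none_neg_one, Option.getD_some, List.foldl_reverse]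
  exact foldr_sufMax vs

theorem a_eq_bestB (e : List Int) (k : Int) (hk : k ≠ 0) :
    maximumEnergy e k = bestB e k.natAbs 0 := by
  have hkk : 1 ≤ k.natAbs := Int.natAbs_pos.mpr hk
  set D := (PySem.List.enumerate e 0).foldl
      (fun d p => d.modify (PySem.Int.mod p.1 k) [] (fun l => l ++ [p.2]))
      (PySem.Dict.empty : PySem.Dict Int (List Int)) with hDdef
  have hnodup : D.keys.Nodup := by
    rw [hDdef]
    exact PySem.Dict.nodup_keys_foldl_modify_key (PySem.List.enumerate e 0)
      (fun p => PySem.Int.mod p.1 k) [] (fun _ p => fun l => l ++ [p.2]) PySem.Dict.empty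
      (by rw [PySem.Dict.keys_empty]; exact List.nodup_nil)
  have hD2 : D = ((List.range e.length).map
      (fun (i : Nat) => (PySem.Int.mod (i : Int) k, e.getD i 0))).foldl
      (fun d p => d.modify p.1 [] (fun l => l ++ [p.2])) PySem.Dict.empty := by
    rw [hDdef, PySem.List.enumerate_eq_map_pyRange e 0]
    simp only [PySem.List.len_eq, PySem.List.pyRange_zero_nat, List.foldl_map,
      PySem.List.pyGetD_natCast]
  have hgetD : ∀ c, D.getD c [] =
      ((List.range e.length).filter (fun (i : Nat) => PySem.Int.mod (i : Int) k == c)).map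
        (fun i => e.getD i 0) := by
    intro c
    rw [hD2, PySem.Dict.getD_foldl_modify_append, PySem.Dict.getD_empty, List.nil_append]
    rw [List.filter_map, List.map_map]
    rfl
  have hkeys : ∀ c, c ∈ D.keys ↔ ∃ i, i < e.length ∧ c = PySem.Int.mod (i : Int) k := by
    intro c
    rw [hDdef, PySem.Dict.keys_foldl_modify_key (PySem.List.enumerate e 0)
      (fun p => PySem.Int.mod p.1 k) [] (fun _ p => fun l => l ++ [p.2]) PySem.Dict.empty,
      PySem.Dict.keys_empty, PySem.Set.update_nil_left, PySem.Set.mem_ofList]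
    simp only [List.mem_map, PySem.List.mem_enumerate_iff]
    constructor
    · rintro ⟨p, ⟨j, hj, rfl⟩, rfl⟩
      exact ⟨j, hj, by norm_num⟩
    · rintro ⟨i, hi, rfl⟩
      exact ⟨((i : Int), e[i]), ⟨i, hi, by norm_num⟩, rfl⟩
  have hA : maximumEnergy e k = (D.values).foldl
      (fun res vs => max res (((PySem.List.slice? vs none none (-1)).getD []).foldl
        (fun (st : Int × Int) v => (st.1 + v, max2 st.2 (st.1 + v))) ((0 : Int), -pvINF)).2)
      (-pvINF) := rfl
  rw [dict_values_eq D hnodup, List.foldl_map] at hA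
  simp only [inner_eq_sufMax] at hA
  -- per-key value: the group of key c is exactly one mod-kk chain
  have hchain : ∀ c ∈ D.keys, ∀ i0, i0 < e.length → c = PySem.Int.mod (i0 : Int) k →
      (sufMax (D.getD c [])).2 = chainM e k.natAbs (i0 % k.natAbs) := by
    intro c _ i0 hi0 hc
    have hfilter : (List.range e.length).filter (fun (i : Nat) => PySem.Int.mod (i : Int) k == c) =
        (List.range e.length).filter
          (fun (i : Nat) => decide (i0 % k.natAbs ≤ i ∧ (i - i0 % k.natAbs) % k.natAbs = 0)) := by
      apply List.filter_congr
      intro x _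
      rw [Bool.eq_iff_iff, beq_iff_eq, decide_eq_true_eq, hc,
        mod_cong k hk x i0]
      exact natmod_char k.natAbs (i0 % k.natAbs) x (Nat.mod_lt i0 (by omega))
    rw [hgetD c, hfilter, filter_chainIdx e.length k.natAbs hkk, chainL_eq_map,
      sufMax_chainL]
  apply le_antisymm
  · -- A ≤ B
    rw [hA]
    rcases foldl_max_proj_mem D.keys (fun c => (sufMax (D.getD c [])).2) (-pvINF) with
      h0 | ⟨c, hc, h1⟩
    · rw [h0]; exact neg_pvINF_le_bestB e k.natAbs 0
    · rw [h1]
      obtain ⟨i0, hi0, hci⟩ := (hkeys c).mp hc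
      rw [hchain c hc i0 hi0 hci]
      rcases chainM_mem e k.natAbs (i0 % k.natAbs) with h2 | ⟨j', _, hj2, hj3⟩
      · rw [h2]; exact neg_pvINF_le_bestB e k.natAbs 0
      · rw [hj3]; exact chainS_le_bestB e k.natAbs 0 j' (Nat.zero_le _) hj2
  · -- B ≤ A
    rw [hA]
    rcases bestB_mem e k.natAbs 0 with h0 | ⟨j, _, hj1, hj2⟩
    · rw [h0]
      exact (PySem.List.le_foldl_max_int D.keys (fun c => (sufMax (D.getD c [])).2) (-pvINF)).1
    · rw [hj2]
      have hcmem : PySem.Int.mod (j : Int) k ∈ D.keys := (hkeys _).mpr ⟨j, hj1, rfl⟩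
      have h3 := (PySem.List.le_foldl_max_int D.keys
        (fun c => (sufMax (D.getD c [])).2) (-pvINF)).2 _ hcmem
      refine le_trans ?_ h3
      rw [hchain _ hcmem j hj1 rfl]
      apply chainS_le_chainM e k.natAbs hkk (j % k.natAbs) j (Nat.mod_le j _) hj1
      have h4 := Nat.div_add_mod j k.natAbs
      exact ⟨j / k.natAbs, by omega⟩

theorem maximumEnergy_spec' (energy : List Int) (k : Int) (h : energy = [] ∨ k ≠ 0) :
    maximumEnergy energy k = maximumEnergy_alt energy k := by
  by_cases hk : k = 0
  · rcases h with he | hne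
    · subst he hk
      rfl
    · exact absurd hk hne
  · rw [a_eq_bestB energy k hk, alt_eq_bestB energy k hk]

-- ===== VERDICT (by name: the statement is the Claim_ definition above) =====
theorem maximumEnergy_spec : Claim_equal_maximumEnergy := by
  intro energy k _ hpre
  unfold Spec_maximumEnergy
  exact maximumEnergy_spec' energy k hpre
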